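-- pv_equiv track=rewrite | github.com/fraim-dev/fraim | fraim/workflows/architecture_discovery/client_discovery.py | _extract_service_base_name
-- ===== SOURCE A (Python) =====
-- def _extract_service_base_name(service_name: str) -> str:
--     """Extract the base name from a service name."""
--     # Remove common service suffixes
--     base_name = service_name.lower()
--     suffixes_to_remove = [
--         " api service", " service", " api", " application", " app",
--         " server", " backend", " frontend", " client"
--     ]
--
--     for suffix in suffixes_to_remove:
--         if base_name.endswith(suffix):
--             base_name = base_name[:-len(suffix)].strip()
--             break
--
--     # Remove common prefixes
--     prefixes_to_remove = ["api ", "service "]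
--     for prefix in prefixes_to_remove:
--         if base_name.startswith(prefix):
--             base_name = base_name[len(prefix):].strip()
--             break
--
--     return base_name.replace(" ", "_").replace("-", "_")
-- ===== SOURCE B (Python) =====
-- def _extract_service_base_name(service_name: str) -> str:
--     """Extract the base name from a service name."""
--     base = service_name.lower()
--
--     # Strip a known suffix: every suffix is " " + a space-free word, except
--     # " api service"; so look only at the part after the LAST space.
--     head, sep, tail = base.rpartition(" ")
--     if sep:
--         if tail == "service":
--             if head.endswith(" api"):
--                 base = head[:-4].strip()
--             else:
--                 base = head.strip()
--         elif tail in ("api", "application", "app", "server",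
--                       "backend", "frontend", "client"):
--             base = head.strip()
--
--     # Strip a known prefix: both prefixes are a space-free word + " ";
--     # so look only at the part before the FIRST space.
--     first, sep, rest = base.partition(" ")
--     if sep and first in ("api", "service"):
--         base = rest.strip()
--
--     return base.replace(" ", "_").replace("-", "_")
-- ===== Notes on version B (the rewrite author's own statement) =====
-- stated objective: alternative
-- what changed: Replaces the sequential endswith/startswith scans over the suffix/prefix lists by one rpartition/partition at the last/first space plus a direct membership test of the isolated token (with one extra endswith for the single two-word suffix), exploiting that every suffix starts with a space and every prefix ends with one.
import Mathlib
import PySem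

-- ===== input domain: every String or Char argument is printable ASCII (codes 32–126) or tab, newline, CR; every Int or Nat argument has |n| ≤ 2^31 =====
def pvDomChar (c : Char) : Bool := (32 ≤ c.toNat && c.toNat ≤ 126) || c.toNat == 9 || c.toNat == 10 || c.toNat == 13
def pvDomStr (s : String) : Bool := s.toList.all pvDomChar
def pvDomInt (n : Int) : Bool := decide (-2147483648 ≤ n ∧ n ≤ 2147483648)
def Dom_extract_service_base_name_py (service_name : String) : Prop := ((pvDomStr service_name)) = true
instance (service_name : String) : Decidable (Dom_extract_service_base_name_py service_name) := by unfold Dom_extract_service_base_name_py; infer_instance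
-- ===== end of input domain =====

-- B replaces A's sequential endswith/startswith scans by one rpartition/partition at the
-- last/first space plus a membership test of the isolated token (objective: alternative).

-- word constants (the affix words, as char lists)
def cAPI : List Char := ['a','p','i']
def cSERVICE : List Char := ['s','e','r','v','i','c','e']
def cAPPLICATION : List Char := ['a','p','p','l','i','c','a','t','i','o','n']
def cAPP : List Char := ['a','p','p']
def cSERVER : List Char := ['s','e','r','v','e','r']
def cBACKEND : List Char := ['b','a','c','k','e','n','d']
def cFRONTEND : List Char := ['f','r','o','n','t','e','n','d']
def cCLIENT : List Char := ['c','l','i','e','n','t']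
-- " api service"
def cAS : List Char := [' ','a','p','i',' ','s','e','r','v','i','c','e']

-- ===== PORT A =====
def aSuffixes : List (List Char) :=
  [cAS, ' '::cSERVICE, ' '::cAPI, ' '::cAPPLICATION, ' '::cAPP,
   ' '::cSERVER, ' '::cBACKEND, ' '::cFRONTEND, ' '::cCLIENT]

def aPrefixes : List (List Char) := [cAPI ++ [' '], cSERVICE ++ [' ']]

-- for suffix in suffixes: if base.endswith(suffix): base = base[:-len(suffix)].strip(); break
def aSuffixLoop (base : List Char) : List (List Char) → List Char
  | [] => base
  | s :: rest =>
    if PySem.Chars.endswith base s then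
      PySem.Chars.strip (PySem.Chars.slice base none (some (-(s.length : Int))))
    else aSuffixLoop base rest

-- for prefix in prefixes: if base.startswith(prefix): base = base[len(prefix):].strip(); break
def aPrefixLoop (base : List Char) : List (List Char) → List Char
  | [] => base
  | p :: rest =>
    if PySem.Chars.startswith base p then
      PySem.Chars.strip (PySem.Chars.slice base (some (p.length : Int)) none)
    else aPrefixLoop base rest

def extract_service_base_name_py (service_name : String) : String :=
  let base := PySem.Chars.lower service_name.toList
  let base := aSuffixLoop base aSuffixes
  let base := aPrefixLoop base aPrefixes
  String.ofList (PySem.Chars.replace (PySem.Chars.replace base [' '] ['_']) ['-'] ['_'])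

-- ===== PORT B =====
-- str.rpartition(" "): split at the LAST space; ("", "", s) if no space (exact port)
def bRPartitionSpace (s : List Char) : List Char × List Char × List Char :=
  match List.span (· != ' ') s.reverse with
  | (_, []) => ([], [], s)
  | (tr, _ :: hr) => (hr.reverse, [' '], tr.reverse)

-- str.partition(" "): split at the FIRST space; (s, "", "") if no space (exact port)
def bPartitionSpace (s : List Char) : List Char × List Char × List Char :=
  match List.span (· != ' ') s with
  | (_, []) => (s, [], [])
  | (f, _ :: r) => (f, [' '], r)

def bStage1 (base : List Char) : List Char :=
  let p := bRPartitionSpace base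
  if p.2.1 ≠ [] then
    if p.2.2 = cSERVICE then
      if PySem.Chars.endswith p.1 (' '::cAPI) then
        PySem.Chars.strip (PySem.Chars.slice p.1 none (some (-4)))
      else PySem.Chars.strip p.1
    else if p.2.2 ∈ [cAPI, cAPPLICATION, cAPP, cSERVER, cBACKEND, cFRONTEND, cCLIENT] then
      PySem.Chars.strip p.1
    else base
  else base

def bStage2 (base : List Char) : List Char :=
  let q := bPartitionSpace base
  if q.2.1 ≠ [] ∧ (q.1 = cAPI ∨ q.1 = cSERVICE) then PySem.Chars.strip q.2.2 else base

def extract_service_base_name_py_alt (service_name : String) : String :=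
  let base := PySem.Chars.lower service_name.toList
  let base := bStage1 base
  let base := bStage2 base
  String.ofList (PySem.Chars.replace (PySem.Chars.replace base [' '] ['_']) ['-'] ['_'])

-- ===== PRECONDITION & SPEC =====
def Spec_extract_service_base_name_py (service_name : String) (out : String) : Prop := out = extract_service_base_name_py_alt service_name
instance (service_name : String) (out : String) : Decidable (Spec_extract_service_base_name_py service_name out) := by unfold Spec_extract_service_base_name_py; infer_instance

-- ===== CLAIM (what is proved, stated in full; the proofs are below) =====
def Claim_equal_extract_service_base_name_py : Prop := ∀ (service_name : String), Dom_extract_service_base_name_py service_name → Spec_extract_service_base_name_py service_name (extract_service_base_name_py service_name)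

-- ===== LEMMAS AND PROOFS =====
set_option maxRecDepth 2000
lemma ns_cAPI : ∀ c ∈ cAPI, c ≠ ' ' := by simp [cAPI]
lemma ns_cSERVICE : ∀ c ∈ cSERVICE, c ≠ ' ' := by simp [cSERVICE]
lemma ns_cAPPLICATION : ∀ c ∈ cAPPLICATION, c ≠ ' ' := by simp [cAPPLICATION]
lemma ns_cAPP : ∀ c ∈ cAPP, c ≠ ' ' := by simp [cAPP]
lemma ns_cSERVER : ∀ c ∈ cSERVER, c ≠ ' ' := by simp [cSERVER]
lemma ns_cBACKEND : ∀ c ∈ cBACKEND, c ≠ ' ' := by simp [cBACKEND]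
lemma ns_cFRONTEND : ∀ c ∈ cFRONTEND, c ≠ ' ' := by simp [cFRONTEND]
lemma ns_cCLIENT : ∀ c ∈ cCLIENT, c ≠ ' ' := by simp [cCLIENT]


lemma takeWhile_all_append (w rest : List Char) (hw : ∀ c ∈ w, c ≠ ' ') :
    List.takeWhile (· != ' ') (w ++ ' ' :: rest) = w := by
  induction w with
  | nil => simp
  | cons a as ih =>
    have ha : a ≠ ' ' := hw a (by simp)
    simp [ha, ih (fun c hc => hw c (by simp [hc]))]

lemma dropWhile_all_append (w rest : List Char) (hw : ∀ c ∈ w, c ≠ ' ') :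
    List.dropWhile (· != ' ') (w ++ ' ' :: rest) = ' ' :: rest := by
  induction w with
  | nil => simp
  | cons a as ih =>
    have ha : a ≠ ' ' := hw a (by simp)
    simp [ha, ih (fun c hc => hw c (by simp [hc]))]

lemma span_all (w rest : List Char) (hw : ∀ c ∈ w, c ≠ ' ') :
    List.span (· != ' ') (w ++ ' ' :: rest) = (w, ' ' :: rest) := by
  rw [List.span_eq_takeWhile_dropWhile, takeWhile_all_append w rest hw,
    dropWhile_all_append w rest hw]

lemma span_nospace (s : List Char) (hs : ∀ c ∈ s, c ≠ ' ') :
    List.span (· != ' ') s = (s, []) := by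
  rw [List.span_eq_takeWhile_dropWhile]
  simp only [Prod.mk.injEq]
  exact ⟨List.takeWhile_eq_self_iff.mpr (by intro c hc; simpa using hs c hc),
    List.dropWhile_eq_nil_iff.mpr (by intro c hc; simpa using hs c hc)⟩

lemma split_first_space_uniq : ∀ (a b x y : List Char), (∀ c ∈ a, c ≠ ' ') → (∀ c ∈ b, c ≠ ' ') →
    a ++ ' ' :: x = b ++ ' ' :: y → a = b ∧ x = y := by
  intro a
  induction a with
  | nil =>
    intro b x y _ hb h
    cases b with
    | nil => simpa using h
    | cons d bs =>
      exfalso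
      simp only [List.nil_append, List.cons_append, List.cons.injEq] at h
      exact hb d (by simp) h.1.symm
  | cons c as ih =>
    intro b x y ha hb h
    cases b with
    | nil =>
      exfalso
      simp only [List.nil_append, List.cons_append, List.cons.injEq] at h
      exact ha c (by simp) h.1
    | cons d bs =>
      simp only [List.cons_append, List.cons.injEq] at h
      obtain ⟨rfl, h2⟩ := h
      obtain ⟨h3, h4⟩ := ih bs x y (fun c hc => ha c (by simp [hc])) (fun c hc => hb c (by simp [hc])) h2
      exact ⟨by rw [h3], h4⟩

lemma split_last_space_uniq (a b x y : List Char) (hx : ∀ c ∈ x, c ≠ ' ') (hy : ∀ c ∈ y, c ≠ ' ')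
    (h : a ++ ' ' :: x = b ++ ' ' :: y) : a = b ∧ x = y := by
  have hr : x.reverse ++ ' ' :: a.reverse = y.reverse ++ ' ' :: b.reverse := by
    have := congrArg List.reverse h
    simpa [List.reverse_append] using this
  obtain ⟨h1, h2⟩ := split_first_space_uniq x.reverse y.reverse a.reverse b.reverse
    (fun c hc => hx c (by simpa using hc)) (fun c hc => hy c (by simpa using hc)) hr
  constructor
  · simpa using congrArg List.reverse h2
  · simpa using congrArg List.reverse h1

lemma rpart_last (h t : List Char) (ht : ∀ c ∈ t, c ≠ ' ') :
    bRPartitionSpace (h ++ ' ' :: t) = (h, [' '], t) := by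
  have hsp : List.span (· != ' ') (h ++ ' ' :: t).reverse = (t.reverse, ' ' :: h.reverse) := by
    have : (h ++ ' ' :: t).reverse = t.reverse ++ ' ' :: h.reverse := by
      simp [List.reverse_append]
    rw [this, span_all t.reverse h.reverse (fun c hc => ht c (by simpa using hc))]
  unfold bRPartitionSpace
  rw [hsp]
  simp

lemma rpart_nospace (s : List Char) (hs : ∀ c ∈ s, c ≠ ' ') :
    bRPartitionSpace s = ([], [], s) := by
  unfold bRPartitionSpace
  rw [span_nospace s.reverse (fun c hc => hs c (by simpa using hc))]

lemma part_first (f r : List Char) (hf : ∀ c ∈ f, c ≠ ' ') :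
    bPartitionSpace (f ++ ' ' :: r) = (f, [' '], r) := by
  unfold bPartitionSpace
  rw [span_all f r hf]

lemma part_nospace (s : List Char) (hs : ∀ c ∈ s, c ≠ ' ') :
    bPartitionSpace s = (s, [], []) := by
  unfold bPartitionSpace
  rw [span_nospace s hs]

-- no space in cs → no " "-headed suffix matches
lemma ends_false_nospace (cs : List Char) (hs : ' ' ∉ cs) (w : List Char) :
    PySem.Chars.endswith cs (' ' :: w) = false := by
  cases hE : PySem.Chars.endswith cs (' ' :: w) with
  | false => rfl
  | true =>
    exfalso
    obtain ⟨u, hu⟩ := (PySem.Chars.endswith_iff cs (' ' :: w)).mp hE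
    exact hs (by rw [← hu]; simp)

lemma starts_false_nospace (cs : List Char) (hs : ' ' ∉ cs) (w : List Char) :
    PySem.Chars.startswith cs (w ++ [' ']) = false := by
  cases hE : PySem.Chars.startswith cs (w ++ [' ']) with
  | false => rfl
  | true =>
    exfalso
    obtain ⟨u, hu⟩ := (PySem.Chars.startswith_iff cs (w ++ [' '])).mp hE
    exact hs (by rw [← hu]; simp)

-- with cs = h ++ ' '::t, ' ' ∉ t: cs ends with " "+w (w space-free) iff t = w
lemma ends_iff_tail (h t w : List Char) (ht : ∀ c ∈ t, c ≠ ' ') (hw : ∀ c ∈ w, c ≠ ' ') :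
    PySem.Chars.endswith (h ++ ' ' :: t) (' ' :: w) = true ↔ t = w := by
  constructor
  · intro hE
    obtain ⟨u, hu⟩ := (PySem.Chars.endswith_iff _ _).mp hE
    exact (split_last_space_uniq u h w t hw ht hu).2.symm
  · rintro rfl
    exact (PySem.Chars.endswith_iff _ _).mpr ⟨h, rfl⟩

lemma ends_false_tail (h t w : List Char) (ht : ∀ c ∈ t, c ≠ ' ') (hw : ∀ c ∈ w, c ≠ ' ')
    (hne : t ≠ w) : PySem.Chars.endswith (h ++ ' ' :: t) (' ' :: w) = false := by
  cases hE : PySem.Chars.endswith (h ++ ' ' :: t) (' ' :: w) with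
  | false => rfl
  | true => exact absurd ((ends_iff_tail h t w ht hw).mp hE) hne

-- " api service": matches iff tail is "service" and the head ends with " api"
lemma ends_iff_api_service (h t : List Char) (ht : ∀ c ∈ t, c ≠ ' ') :
    PySem.Chars.endswith (h ++ ' ' :: t) cAS = true ↔
      (t = cSERVICE ∧ PySem.Chars.endswith h (' ' :: cAPI) = true) := by
  constructor
  · intro hE
    obtain ⟨u, hu⟩ := (PySem.Chars.endswith_iff _ _).mp hE
    have hu' : (u ++ ' ' :: cAPI) ++ ' ' :: cSERVICE = h ++ ' ' :: t := by
      simpa [cAS, cAPI, cSERVICE] using hu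
    obtain ⟨h1, h2⟩ := split_last_space_uniq (u ++ ' ' :: cAPI) h cSERVICE t
      ns_cSERVICE ht hu'
    exact ⟨h2.symm, (PySem.Chars.endswith_iff _ _).mpr ⟨u, h1⟩⟩
  · rintro ⟨rfl, hapi⟩
    obtain ⟨u, hu⟩ := (PySem.Chars.endswith_iff _ _).mp hapi
    exact (PySem.Chars.endswith_iff _ _).mpr ⟨u, by rw [← hu]; simp [cAS, cAPI, cSERVICE]⟩

lemma ends_false_api_service (h t : List Char) (ht : ∀ c ∈ t, c ≠ ' ')
    (hne : t ≠ cSERVICE) : PySem.Chars.endswith (h ++ ' ' :: t) cAS = false := by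
  cases hE : PySem.Chars.endswith (h ++ ' ' :: t) cAS with
  | false => rfl
  | true => exact absurd ((ends_iff_api_service h t ht).mp hE).1 hne

lemma starts_iff_head (f r w : List Char) (hf : ∀ c ∈ f, c ≠ ' ') (hw : ∀ c ∈ w, c ≠ ' ') :
    PySem.Chars.startswith (f ++ ' ' :: r) (w ++ [' ']) = true ↔ w = f := by
  constructor
  · intro hS
    obtain ⟨u, hu⟩ := (PySem.Chars.startswith_iff _ _).mp hS
    have hu' : w ++ ' ' :: u = f ++ ' ' :: r := by simpa using hu
    exact (split_first_space_uniq w f u r hw hf hu').1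
  · rintro rfl
    exact (PySem.Chars.startswith_iff _ _).mpr ⟨r, by simp⟩

lemma starts_false_head (f r w : List Char) (hf : ∀ c ∈ f, c ≠ ' ') (hw : ∀ c ∈ w, c ≠ ' ')
    (hne : w ≠ f) : PySem.Chars.startswith (f ++ ' ' :: r) (w ++ [' ']) = false := by
  cases hS : PySem.Chars.startswith (f ++ ' ' :: r) (w ++ [' ']) with
  | false => rfl
  | true => exact absurd ((starts_iff_head f r w hf hw).mp hS) hne

lemma exists_first_space : ∀ (cs : List Char), ' ' ∈ cs →
    ∃ f r, cs = f ++ ' ' :: r ∧ ∀ c ∈ f, c ≠ ' ' := by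
  intro cs
  induction cs with
  | nil => intro h; simp at h
  | cons c cs' ih =>
    intro h
    by_cases hc : c = ' '
    · exact ⟨[], cs', by simp [hc], by simp⟩
    · have h' : ' ' ∈ cs' := by
        rcases List.mem_cons.mp h with h1 | h1
        · exact absurd h1.symm hc
        · exact h1
      obtain ⟨f, r, hfr, hf⟩ := ih h'
      refine ⟨c :: f, r, by simp [hfr], ?_⟩
      intro d hd
      rcases List.mem_cons.mp hd with rfl | hd'
      · exact hc
      · exact hf d hd'

lemma exists_last_space (cs : List Char) (h : ' ' ∈ cs) :
    ∃ h' t, cs = h' ++ ' ' :: t ∧ ∀ c ∈ t, c ≠ ' ' := by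
  obtain ⟨f, r, hfr, hf⟩ := exists_first_space cs.reverse (by simpa using h)
  refine ⟨r.reverse, f.reverse, ?_, fun c hc => hf c (by simpa using hc)⟩
  have := congrArg List.reverse hfr
  simpa [List.reverse_append] using this

-- slicing off a matched suffix " "+w leaves exactly the head
lemma slice_cut_suffix (h w : List Char) :
    PySem.Chars.slice (h ++ ' ' :: w) none (some (-(((' ' :: w : List Char)).length : Int))) = h := by
  rw [PySem.Chars.slice_eq_listSlice]
  rw [PySem.List.slice_to_neg_natCast _ (' ' :: w).length (by simp)]
  have : (h ++ ' ' :: w).length - (' ' :: w).length = h.length := by simp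
  rw [this, List.take_left]

-- slicing off a matched prefix w+" " leaves exactly the rest
lemma slice_cut_prefix (w r : List Char) :
    PySem.Chars.slice (w ++ ' ' :: r) (some (((w ++ [' '] : List Char)).length : Int)) none = r := by
  rw [PySem.Chars.slice_eq_listSlice]
  rw [PySem.List.slice_from _ (by positivity)]
  have h1 : w ++ ' ' :: r = (w ++ [' ']) ++ r := by simp
  rw [h1]
  have h2 : ((((w ++ [' '] : List Char)).length : Int)).toNat = (w ++ [' ']).length := by simp
  rw [h2, List.drop_left]

lemma stage1_eq (cs : List Char) : aSuffixLoop cs aSuffixes = bStage1 cs := by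
  by_cases hsp : ' ' ∈ cs
  · obtain ⟨h, t, rfl, ht⟩ := exists_last_space cs hsp
    have hrp := rpart_last h t ht
    by_cases h1 : t = cSERVICE
    · subst h1
      by_cases h2 : PySem.Chars.endswith h (' ' :: cAPI) = true
      · -- " api service" matches
        obtain ⟨u, hu⟩ := (PySem.Chars.endswith_iff _ _).mp h2
        have hAS : PySem.Chars.endswith (h ++ ' ' :: cSERVICE) cAS = true :=
          (ends_iff_api_service h cSERVICE ht).mpr ⟨rfl, h2⟩
        have hcs : h ++ ' ' :: cSERVICE = u ++ ' ' :: ('a'::'p'::'i'::' '::cSERVICE) := by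
          rw [← hu]; simp [cAPI]
        have hh : h = u ++ ' ' :: cAPI := hu.symm
        simp only [aSuffixLoop, aSuffixes, hAS, if_true]
        rw [bStage1, hrp]
        simp only [ne_eq, List.cons_ne_nil, not_false_iff, if_true, ite_true, h2]
        rw [hcs]
        have : cAS.length = (' ' :: ('a'::'p'::'i'::' '::cSERVICE) : List Char).length := by simp [cAS, cSERVICE]
        rw [show (-(cAS.length : Int)) = -(((' ' :: ('a'::'p'::'i'::' '::cSERVICE) : List Char)).length : Int) by rw [this]]
        rw [slice_cut_suffix u ('a'::'p'::'i'::' '::cSERVICE)]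
        rw [hh]
        rw [show ((-4 : Int)) = -(((' ' :: cAPI : List Char)).length : Int) by simp [cAPI]]
        rw [slice_cut_suffix u cAPI]
      · -- only " service" matches
        have h2f : PySem.Chars.endswith h (' ' :: cAPI) = false := by
          cases hb : PySem.Chars.endswith h (' ' :: cAPI) with
          | false => rfl
          | true => exact absurd hb h2
        have hAS : PySem.Chars.endswith (h ++ ' ' :: cSERVICE) cAS = false := by
          cases hb : PySem.Chars.endswith (h ++ ' ' :: cSERVICE) cAS with
          | false => rfl
          | true => exact absurd ((ends_iff_api_service h cSERVICE ht).mp hb).2 h2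
        have hserv : PySem.Chars.endswith (h ++ ' ' :: cSERVICE) (' ' :: cSERVICE) = true :=
          (ends_iff_tail h cSERVICE cSERVICE ht ns_cSERVICE).mpr rfl
        simp only [aSuffixLoop, aSuffixes, hAS, hserv, if_false, if_true, Bool.false_eq_true]
        rw [bStage1, hrp]
        simp only [ne_eq, List.cons_ne_nil, not_false_iff, if_true, ite_true, h2f]
        rw [show (-((' ' :: cSERVICE : List Char).length : Int)) = -(((' ' :: cSERVICE : List Char)).length : Int) from rfl]
        rw [slice_cut_suffix h cSERVICE]
        simp
    · -- t ≠ "service"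
      have hAS := ends_false_api_service h t ht h1
      have hserv := ends_false_tail h t cSERVICE ht ns_cSERVICE h1
      have echk : ∀ w : List Char, (∀ c ∈ w, c ≠ ' ') →
          (PySem.Chars.endswith (h ++ ' ' :: t) (' ' :: w) = true ↔ t = w) :=
        fun w hw => ends_iff_tail h t w ht hw
      rw [bStage1, hrp]
      simp only [ne_eq, List.cons_ne_nil, not_false_iff, if_true, ite_true, h1, if_false]
      by_cases h3 : t = cAPI
      · subst h3
        have hm : PySem.Chars.endswith (h ++ ' ' :: cAPI) (' ' :: cAPI) = true :=
          (echk cAPI ns_cAPI).mpr rfl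
        simp only [aSuffixLoop, aSuffixes, hAS, hserv, hm, if_false, if_true, Bool.false_eq_true]
        rw [slice_cut_suffix h cAPI]
        simp [cAPI, cAPPLICATION, cAPP, cSERVER, cBACKEND, cFRONTEND, cCLIENT, cSERVICE]
      · by_cases h4 : t = cAPPLICATION
        · subst h4
          have hm : PySem.Chars.endswith (h ++ ' ' :: cAPPLICATION) (' ' :: cAPPLICATION) = true :=
            (echk cAPPLICATION ns_cAPPLICATION).mpr rfl
          have f3 := ends_false_tail h cAPPLICATION cAPI ht ns_cAPI (by simp [cAPPLICATION, cAPI])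
          simp only [aSuffixLoop, aSuffixes, hAS, hserv, f3, hm, if_false, if_true, Bool.false_eq_true]
          rw [slice_cut_suffix h cAPPLICATION]
          simp [cAPI, cAPPLICATION, cAPP, cSERVER, cBACKEND, cFRONTEND, cCLIENT, cSERVICE]
        · by_cases h5 : t = cAPP
          · subst h5
            have hm : PySem.Chars.endswith (h ++ ' ' :: cAPP) (' ' :: cAPP) = true :=
              (echk cAPP ns_cAPP).mpr rfl
            have f3 := ends_false_tail h cAPP cAPI ht ns_cAPI (by simp [cAPP, cAPI])
            have f4 := ends_false_tail h cAPP cAPPLICATION ht ns_cAPPLICATION (by simp [cAPP, cAPPLICATION])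
            simp only [aSuffixLoop, aSuffixes, hAS, hserv, f3, f4, hm, if_false, if_true, Bool.false_eq_true]
            rw [slice_cut_suffix h cAPP]
            simp [cAPI, cAPPLICATION, cAPP, cSERVER, cBACKEND, cFRONTEND, cCLIENT, cSERVICE]
          · by_cases h6 : t = cSERVER
            · subst h6
              have hm : PySem.Chars.endswith (h ++ ' ' :: cSERVER) (' ' :: cSERVER) = true :=
                (echk cSERVER ns_cSERVER).mpr rfl
              have f3 := ends_false_tail h cSERVER cAPI ht ns_cAPI (by simp [cSERVER, cAPI])
              have f4 := ends_false_tail h cSERVER cAPPLICATION ht ns_cAPPLICATION (by simp [cSERVER, cAPPLICATION])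
              have f5 := ends_false_tail h cSERVER cAPP ht ns_cAPP (by simp [cSERVER, cAPP])
              simp only [aSuffixLoop, aSuffixes, hAS, hserv, f3, f4, f5, hm, if_false, if_true, Bool.false_eq_true]
              rw [slice_cut_suffix h cSERVER]
              simp [cAPI, cAPPLICATION, cAPP, cSERVER, cBACKEND, cFRONTEND, cCLIENT, cSERVICE]
            · by_cases h7 : t = cBACKEND
              · subst h7
                have hm : PySem.Chars.endswith (h ++ ' ' :: cBACKEND) (' ' :: cBACKEND) = true :=
                  (echk cBACKEND ns_cBACKEND).mpr rfl
                have f3 := ends_false_tail h cBACKEND cAPI ht ns_cAPI (by simp [cBACKEND, cAPI])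
                have f4 := ends_false_tail h cBACKEND cAPPLICATION ht ns_cAPPLICATION (by simp [cBACKEND, cAPPLICATION])
                have f5 := ends_false_tail h cBACKEND cAPP ht ns_cAPP (by simp [cBACKEND, cAPP])
                have f6 := ends_false_tail h cBACKEND cSERVER ht ns_cSERVER (by simp [cBACKEND, cSERVER])
                simp only [aSuffixLoop, aSuffixes, hAS, hserv, f3, f4, f5, f6, hm, if_false, if_true, Bool.false_eq_true]
                rw [slice_cut_suffix h cBACKEND]
                simp [cAPI, cAPPLICATION, cAPP, cSERVER, cBACKEND, cFRONTEND, cCLIENT, cSERVICE]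
              · by_cases h8 : t = cFRONTEND
                · subst h8
                  have hm : PySem.Chars.endswith (h ++ ' ' :: cFRONTEND) (' ' :: cFRONTEND) = true :=
                    (echk cFRONTEND ns_cFRONTEND).mpr rfl
                  have f3 := ends_false_tail h cFRONTEND cAPI ht ns_cAPI (by simp [cFRONTEND, cAPI])
                  have f4 := ends_false_tail h cFRONTEND cAPPLICATION ht ns_cAPPLICATION (by simp [cFRONTEND, cAPPLICATION])
                  have f5 := ends_false_tail h cFRONTEND cAPP ht ns_cAPP (by simp [cFRONTEND, cAPP])
                  have f6 := ends_false_tail h cFRONTEND cSERVER ht ns_cSERVER (by simp [cFRONTEND, cSERVER])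
                  have f7 := ends_false_tail h cFRONTEND cBACKEND ht ns_cBACKEND (by simp [cFRONTEND, cBACKEND])
                  simp only [aSuffixLoop, aSuffixes, hAS, hserv, f3, f4, f5, f6, f7, hm, if_false, if_true, Bool.false_eq_true]
                  rw [slice_cut_suffix h cFRONTEND]
                  simp [cAPI, cAPPLICATION, cAPP, cSERVER, cBACKEND, cFRONTEND, cCLIENT, cSERVICE]
                · by_cases h9 : t = cCLIENT
                  · subst h9
                    have hm : PySem.Chars.endswith (h ++ ' ' :: cCLIENT) (' ' :: cCLIENT) = true :=
                      (echk cCLIENT ns_cCLIENT).mpr rfl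
                    have f3 := ends_false_tail h cCLIENT cAPI ht ns_cAPI (by simp [cCLIENT, cAPI])
                    have f4 := ends_false_tail h cCLIENT cAPPLICATION ht ns_cAPPLICATION (by simp [cCLIENT, cAPPLICATION])
                    have f5 := ends_false_tail h cCLIENT cAPP ht ns_cAPP (by simp [cCLIENT, cAPP])
                    have f6 := ends_false_tail h cCLIENT cSERVER ht ns_cSERVER (by simp [cCLIENT, cSERVER])
                    have f7 := ends_false_tail h cCLIENT cBACKEND ht ns_cBACKEND (by simp [cCLIENT, cBACKEND])
                    have f8 := ends_false_tail h cCLIENT cFRONTEND ht ns_cFRONTEND (by simp [cCLIENT, cFRONTEND])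
                    simp only [aSuffixLoop, aSuffixes, hAS, hserv, f3, f4, f5, f6, f7, f8, hm, if_false, if_true, Bool.false_eq_true]
                    rw [slice_cut_suffix h cCLIENT]
                    simp [cAPI, cAPPLICATION, cAPP, cSERVER, cBACKEND, cFRONTEND, cCLIENT, cSERVICE]
                  · -- no suffix matches
                    have f3 := ends_false_tail h t cAPI ht ns_cAPI h3
                    have f4 := ends_false_tail h t cAPPLICATION ht ns_cAPPLICATION h4
                    have f5 := ends_false_tail h t cAPP ht ns_cAPP h5
                    have f6 := ends_false_tail h t cSERVER ht ns_cSERVER h6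
                    have f7 := ends_false_tail h t cBACKEND ht ns_cBACKEND h7
                    have f8 := ends_false_tail h t cFRONTEND ht ns_cFRONTEND h8
                    have f9 := ends_false_tail h t cCLIENT ht ns_cCLIENT h9
                    simp only [aSuffixLoop, aSuffixes, hAS, hserv, f3, f4, f5, f6, f7, f8, f9,
                      if_false, Bool.false_eq_true]
                    simp [h3, h4, h5, h6, h7, h8, h9]
  · -- no space: nothing matches, both sides return cs
    have hall : ∀ c ∈ cs, c ≠ ' ' := fun c hc he => hsp (he ▸ hc)
    have hB := rpart_nospace cs hall
    rw [bStage1, hB]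
    simp only [ne_eq, not_true, if_false, ite_false, reduceIte]
    have e1 := ends_false_nospace cs hsp
    have eAS : PySem.Chars.endswith cs cAS = false := e1 ('a'::'p'::'i'::' '::cSERVICE)
    simp only [aSuffixLoop, aSuffixes, eAS, e1, if_false, Bool.false_eq_true]

lemma stage2_eq (cs : List Char) : aPrefixLoop cs aPrefixes = bStage2 cs := by
  by_cases hsp : ' ' ∈ cs
  · obtain ⟨f, r, rfl, hf⟩ := exists_first_space cs hsp
    have hp := part_first f r hf
    rw [bStage2, hp]
    by_cases h1 : f = cAPI
    · subst h1
      have hm : PySem.Chars.startswith (cAPI ++ ' ' :: r) (cAPI ++ [' ']) = true :=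
        (starts_iff_head cAPI r cAPI hf ns_cAPI).mpr rfl
      simp only [aPrefixLoop, aPrefixes, hm, if_true]
      rw [slice_cut_prefix cAPI r]
      simp
    · by_cases h2 : f = cSERVICE
      · subst h2
        have hn : PySem.Chars.startswith (cSERVICE ++ ' ' :: r) (cAPI ++ [' ']) = false :=
          starts_false_head cSERVICE r cAPI hf ns_cAPI (by simp [cAPI, cSERVICE])
        have hm : PySem.Chars.startswith (cSERVICE ++ ' ' :: r) (cSERVICE ++ [' ']) = true :=
          (starts_iff_head cSERVICE r cSERVICE hf ns_cSERVICE).mpr rfl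
        simp only [aPrefixLoop, aPrefixes, hn, hm, if_false, if_true, Bool.false_eq_true]
        rw [slice_cut_prefix cSERVICE r]
        simp [cAPI, cSERVICE]
      · have hn1 : PySem.Chars.startswith (f ++ ' ' :: r) (cAPI ++ [' ']) = false :=
          starts_false_head f r cAPI hf ns_cAPI (fun he => h1 he.symm)
        have hn2 : PySem.Chars.startswith (f ++ ' ' :: r) (cSERVICE ++ [' ']) = false :=
          starts_false_head f r cSERVICE hf ns_cSERVICE (fun he => h2 he.symm)
        simp only [aPrefixLoop, aPrefixes, hn1, hn2, if_false, Bool.false_eq_true]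
        simp [h1, h2]
  · have hall : ∀ c ∈ cs, c ≠ ' ' := fun c hc he => hsp (he ▸ hc)
    have hB := part_nospace cs hall
    rw [bStage2, hB]
    have s1 := starts_false_nospace cs hsp
    have n1 : PySem.Chars.startswith cs (cAPI ++ [' ']) = false := s1 cAPI
    have n2 : PySem.Chars.startswith cs (cSERVICE ++ [' ']) = false := s1 cSERVICE
    simp only [aPrefixLoop, aPrefixes, n1, n2, if_false, Bool.false_eq_true]
    simp

-- ===== VERDICT (by name: the statement is the Claim_ definition above) =====
theorem extract_service_base_name_py_spec : Claim_equal_extract_service_base_name_py := by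
  intro s _
  simp only [Spec_extract_service_base_name_py, extract_service_base_name_py,
    extract_service_base_name_py_alt, stage1_eq, stage2_eq]
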